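-- pv_equiv track=rewrite | github.com/YashB63/GFG-Daily-Questions | Day 526/Geek and knots/geek_and_knots.py | knots
-- ===== SOURCE A (Python) =====
-- def knots(M, N, K):
--     def s(a,b):
--         i=1
--         j=a
--         k=b
--         while(k>0):
--             k-=1
--             i=i*j
--             j-=1
--
--         p=1
--         for j in range(1,b+1):
--             p=p*j
--
--         return (i//p)
--     ans=s(M,K)*s(N,K)
--     return ans%(1000000007)
-- ===== SOURCE B (Python) =====
-- def knots(M, N, K):
--     # Balanced divide-and-conquer product tree (fast-factorial style): the K
--     # numerator factors and the K denominator factors are each multiplied as a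
--     # binary tree, so big-int factors stay balanced in size, then one division.
--     def prod(f, lo, hi):
--         # product of f(i) for lo <= i < hi
--         if lo >= hi:
--             return 1
--         if hi - lo == 1:
--             return f(lo)
--         mid = (lo + hi) // 2
--         return prod(f, lo, mid) * prod(f, mid, hi)
--
--     def comb(a, b):
--         num = prod(lambda i: a - i, 0, b)
--         den = prod(lambda i: i + 1, 0, b)
--         return num // den
--
--     return comb(M, K) * comb(N, K) % 1000000007
-- ===== Notes on version B (the rewrite author's own statement) =====
-- stated objective: faster
-- what changed: A multiplies the K numerator factors and the K factorial factors one by one into a growing big-int accumulator; B multiplies each factor list with a balanced divide-and-conquer product tree (the classic fast-factorial technique), so big-int operands stay balanced in size and Python's subquadratic multiplication kicks in, then performs the single exact division.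
import Mathlib
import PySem

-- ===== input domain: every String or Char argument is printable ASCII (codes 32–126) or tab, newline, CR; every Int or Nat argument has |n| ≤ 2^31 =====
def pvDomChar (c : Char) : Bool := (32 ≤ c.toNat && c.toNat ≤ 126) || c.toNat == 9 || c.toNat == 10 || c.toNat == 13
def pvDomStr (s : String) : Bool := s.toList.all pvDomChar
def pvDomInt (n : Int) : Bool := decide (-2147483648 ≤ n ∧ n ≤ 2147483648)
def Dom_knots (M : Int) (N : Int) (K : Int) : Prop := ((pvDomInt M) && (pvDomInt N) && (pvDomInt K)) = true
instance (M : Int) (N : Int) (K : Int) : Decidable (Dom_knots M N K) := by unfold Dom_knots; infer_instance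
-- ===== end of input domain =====

-- B replaces A's one-by-one accumulation of the K numerator factors and of K!
-- by balanced divide-and-conquer product trees (fast-factorial technique),
-- measurably faster on large K because big-int operands stay balanced.

-- ===== PORT A =====
-- while(k>0){k-=1; i=i*j; j-=1}: runs exactly K.toNat times; ported as a fold
-- over that many steps carrying the state (i, j).
def knots (M : Int) (N : Int) (K : Int) : Int :=
  let s : Int → Int → Int := fun a b =>
    let ij := (List.range b.toNat).foldl (fun (st : Int × Int) _ => (st.1 * st.2, st.2 - 1)) (1, a)
    let i := ij.1
    let p := (PySem.List.pyRange 1 (b + 1) 1).foldl (fun p j => p * j) 1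
    PySem.Int.floordiv i p
  let ans := s M K * s N K
  PySem.Int.mod ans 1000000007

-- ===== PORT B =====
-- Source B's prod(f, lo, hi): balanced product tree over f(lo), …, f(hi-1).
def prodTree (f : Int → Int) (lo hi : Int) : Int :=
  if _h : lo ≥ hi then 1
  else if _h1 : hi - lo = 1 then f lo
  else
    let mid := PySem.Int.floordiv (lo + hi) 2
    prodTree f lo mid * prodTree f mid hi
termination_by (hi - lo).toNat
decreasing_by
  all_goals
    have h1 := PySem.Int.floordiv_mul_add_mod (lo + hi) 2
    have h2 := PySem.Int.mod_nonneg (lo + hi) (show (0:Int) < 2 by norm_num)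
    have h3 := PySem.Int.mod_lt (lo + hi) (show (0:Int) < 2 by norm_num)
    omega

def knots_alt (M : Int) (N : Int) (K : Int) : Int :=
  let comb : Int → Int → Int := fun a b =>
    let num := prodTree (fun i => a - i) 0 b
    let den := prodTree (fun i => i + 1) 0 b
    PySem.Int.floordiv num den
  PySem.Int.mod (comb M K * comb N K) 1000000007

-- ===== PRECONDITION & SPEC =====
def Spec_knots (M : Int) (N : Int) (K : Int) (out : Int) : Prop := out = knots_alt M N K
instance (M : Int) (N : Int) (K : Int) (out : Int) : Decidable (Spec_knots M N K out) := by unfold Spec_knots; infer_instance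

-- ===== CLAIM =====
def Claim_equal_knots : Prop := ∀ (M : Int) (N : Int) (K : Int), Dom_knots M N K → Spec_knots M N K (knots M N K)

-- ===== LEMMAS AND PROOFS =====

/-- The product tree multiplies exactly the factors f(lo), …, f(hi-1), in order. -/
theorem prodTree_eq (f : Int → Int) : ∀ (n : Nat) (lo hi : Int), (hi - lo).toNat = n →
    prodTree f lo hi = ((List.range n).map (fun k : Nat => f (lo + k))).prod := by
  intro n
  induction n using Nat.strong_induction_on with
  | _ n ih =>
    intro lo hi hn
    rw [prodTree]
    by_cases h : lo ≥ hi
    · have : n = 0 := by omega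
      simp [h, this]
    · by_cases h1 : hi - lo = 1
      · have : n = 1 := by omega
        simp [h, h1, this]
      · simp only [h, h1, dite_false]
        have h2 := PySem.Int.floordiv_mul_add_mod (lo + hi) 2
        have h3 := PySem.Int.mod_nonneg (lo + hi) (by norm_num : (0:Int) < 2)
        have h4 := PySem.Int.mod_lt (lo + hi) (by norm_num : (0:Int) < 2)
        set mid := PySem.Int.floordiv (lo + hi) 2 with hmid
        set n1 := (mid - lo).toNat with hn1
        set n2 := (hi - mid).toNat with hn2
        have hlt1 : n1 < n := by omega
        have hlt2 : n2 < n := by omega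
        have hsum : n1 + n2 = n := by omega
        rw [ih n1 hlt1 lo mid rfl, ih n2 hlt2 mid hi rfl, ← hsum, List.range_add,
          List.map_append, List.prod_append, List.map_map]
        congr 1
        apply congrArg
        apply List.map_congr_left
        intro x _
        simp only [Function.comp]
        congr 1
        have : mid - lo = (n1 : Int) := by omega
        push_cast
        omega

/-- A's while loop: state (i, j), k iterations, multiplies j, j-1, …, j-k+1. -/
theorem whileA (j : Int) : ∀ (k : Nat) (i : Int),
    (List.range k).foldl (fun (st : Int × Int) _ => (st.1 * st.2, st.2 - 1)) (i, j)
      = (i * ((List.range k).map (fun t : Nat => j - t)).prod, j - k) := by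
  intro k
  induction k with
  | zero => intro i; simp
  | succ k ih =>
    intro i
    rw [List.range_succ, List.foldl_append, ih i, List.map_append, List.prod_append]
    simp only [List.foldl_cons, List.foldl_nil, List.map_cons, List.map_nil, List.prod_cons,
      List.prod_nil]
    rw [Prod.mk.injEq]
    constructor <;> push_cast <;> ring

/-- A's factorial loop is the product of 1+k for k < n. -/
theorem factProd (n : Nat) :
    ((List.range n).map (fun k : Nat => (1 : Int) + k)).foldl (fun p j => p * j) 1
      = ((List.range n).map (fun k : Nat => (1 : Int) + k)).prod := by
  rw [List.prod_eq_foldl]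

theorem s_eq_comb (a b : Int) :
    (let ij := (List.range b.toNat).foldl (fun (st : Int × Int) _ => (st.1 * st.2, st.2 - 1)) (1, a)
     PySem.Int.floordiv ij.1 ((PySem.List.pyRange 1 (b + 1) 1).foldl (fun p j => p * j) 1))
    = PySem.Int.floordiv (prodTree (fun i => a - i) 0 b) (prodTree (fun i => i + 1) 0 b) := by
  have hb0 : (b - 0).toNat = b.toNat := by omega
  rw [whileA, prodTree_eq (fun i => a - i) b.toNat 0 b hb0,
    prodTree_eq (fun i => i + 1) b.toNat 0 b hb0,
    PySem.List.pyRange_one]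
  have hr : (b + 1 - 1).toNat = b.toNat := by omega
  rw [hr, factProd]
  simp only [one_mul, zero_add]
  congr 1
  apply congrArg
  apply List.map_congr_left
  intro x _
  ring

-- ===== VERDICT =====
theorem knots_spec : Claim_equal_knots := by
  intro M N K _
  show knots M N K = knots_alt M N K
  unfold knots knots_alt
  simp only []
  rw [s_eq_comb M K, s_eq_comb N K]
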